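-- pv_equiv track=rewrite | github.com/Alan107-gif/Quantum-computer-simulator | quantum_sim2.py | expand_macros
-- ===== SOURCE A (Python) =====
-- def expand_macros(commands, macros):
--     """
--     Erweitert alle CALL-Befehle durch die entsprechenden Makrobefehle.
--     """
--     expanded = []
--     for cmd, args in commands:
--         if cmd == "CALL":
--             macro_name = args[0]
--             if macro_name not in macros:
--                 raise ValueError(f"Makro '{macro_name}' nicht definiert")
--             # Rekursive Expansion:
--             expanded.extend(expand_macros(macros[macro_name], macros))
--         else:
--             expanded.append((cmd, args))
--     return expanded
-- ===== SOURCE B (Python) =====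
-- def expand_macros(commands, macros):
--     """
--     Erweitert alle CALL-Befehle durch die entsprechenden Makrobefehle.
--     Iterative Fixpunkt-Variante: wiederholte einstufige Expansion statt Rekursion.
--     """
--     current = list(commands)
--     while any(cmd == "CALL" for cmd, _ in current):
--         nxt = []
--         for cmd, args in current:
--             if cmd == "CALL":
--                 macro_name = args[0]
--                 if macro_name not in macros:
--                     raise ValueError(f"Makro '{macro_name}' nicht definiert")
--                 nxt.extend(macros[macro_name])
--             else:
--                 nxt.append((cmd, args))
--         current = nxt
--     return current
-- ===== Notes on version B (the rewrite author's own statement) =====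
-- stated objective: alternative
-- what changed: Replaces the depth-first recursive macro expansion by an iterative fixpoint that repeatedly performs one whole level of CALL substitution over the command list until no CALL remains.
import Mathlib
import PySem

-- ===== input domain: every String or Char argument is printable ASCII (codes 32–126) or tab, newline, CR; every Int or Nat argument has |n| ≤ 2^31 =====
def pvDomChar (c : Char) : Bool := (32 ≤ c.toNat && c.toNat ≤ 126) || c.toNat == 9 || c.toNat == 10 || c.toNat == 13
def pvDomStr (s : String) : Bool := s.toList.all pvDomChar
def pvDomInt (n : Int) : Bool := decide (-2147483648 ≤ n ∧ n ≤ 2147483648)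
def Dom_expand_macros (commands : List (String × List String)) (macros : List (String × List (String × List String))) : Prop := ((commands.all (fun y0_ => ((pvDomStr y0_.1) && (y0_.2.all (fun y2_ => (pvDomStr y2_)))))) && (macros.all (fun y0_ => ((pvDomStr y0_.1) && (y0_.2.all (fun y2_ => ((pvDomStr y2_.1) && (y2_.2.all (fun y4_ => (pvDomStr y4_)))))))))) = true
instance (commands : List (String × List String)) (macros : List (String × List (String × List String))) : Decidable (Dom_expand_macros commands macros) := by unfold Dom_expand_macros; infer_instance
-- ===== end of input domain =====

-- B expands macros by iterated one-level substitution instead of A's recursion; equal output on all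
-- non-raising inputs (Pre_); where A raises (ValueError/IndexError/RecursionError) B raises or loops too.

-- dict lookup (first match under the assoc-list convention)
def pvLookup (macros : List (String × List (String × List String))) (n : String) : Option (List (String × List String)) :=
  (macros.find? (fun p => p.1 == n)).map (·.2)

-- ===== PORT A =====
-- fuel = macros.length + 1 bounds the macro nesting depth; under Pre_ the 0-fuel branch is never reached
def expandAux (macros : List (String × List (String × List String))) : Nat → List (String × List String) → List (String × List String)
  | 0, cs => cs
  | f+1, cs => cs.foldl (fun acc c =>
      if c.1 == "CALL" then
        match c.2.head? with
        | none => acc            -- Python: IndexError (excluded by Pre_)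
        | some name =>
          match pvLookup macros name with
          | none => acc          -- Python: raise ValueError (excluded by Pre_)
          | some body => acc ++ expandAux macros f body
      else acc ++ [c]) []

def expand_macros (commands : List (String × List String)) (macros : List (String × List (String × List String))) : List (String × List String) :=
  expandAux macros (macros.length + 1) commands

-- ===== PORT B =====
def hasCall (cs : List (String × List String)) : Bool := cs.any (fun c => c.1 == "CALL")

-- one whole level of CALL substitution (the body of Source B's while loop)
def stepB (macros : List (String × List (String × List String))) (cs : List (String × List String)) : List (String × List String) :=
  cs.foldl (fun acc c =>
    if c.1 == "CALL" then
      match c.2.head? with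
      | none => acc              -- Python: IndexError (excluded by Pre_)
      | some name =>
        match pvLookup macros name with
        | none => acc            -- Python: raise ValueError (excluded by Pre_)
        | some body => acc ++ body
    else acc ++ [c]) []

-- fuel = macros.length + 1 bounds the number of while-loop rounds; under Pre_ the loop exits via hasCall
def loopB (macros : List (String × List (String × List String))) : Nat → List (String × List String) → List (String × List String)
  | 0, cs => cs
  | f+1, cs => if hasCall cs then loopB macros f (stepB macros cs) else cs

def expand_macros_alt (commands : List (String × List String)) (macros : List (String × List (String × List String))) : List (String × List String) :=
  loopB macros (macros.length + 1) commands

-- ===== PRECONDITION & SPEC =====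
-- call-graph helpers for Pre_: callees of a body, successors of a macro name, bounded reachability closure
def pvCallees (body : List (String × List String)) : List String :=
  body.filterMap (fun c => if c.1 == "CALL" then c.2.head? else none)

def pvSuccs (macros : List (String × List (String × List String))) (n : String) : List String :=
  match pvLookup macros n with
  | some b => pvCallees b
  | none => []

def pvReach (macros : List (String × List (String × List String))) (s : List String) : List String :=
  ((fun t => (t ++ t.flatMap (pvSuccs macros)).dedup)^[macros.length + 1]) s

def pvOkBody (macros : List (String × List (String × List String))) (body : List (String × List String)) : Bool :=
  body.all (fun c => !(c.1 == "CALL") ||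
    (match c.2.head? with
     | some n => (pvLookup macros n).isSome
     | none => false))

-- Pre_ = exactly the inputs on which Python A returns: every CALL in the commands and in every
-- REACHABLE macro body has a first argument naming a defined macro, and the reachable part of the
-- macro call graph has no cycle (otherwise A raises IndexError/ValueError/RecursionError).
def Pre_expand_macros (commands : List (String × List String)) (macros : List (String × List (String × List String))) : Prop :=
  pvOkBody macros commands = true ∧
  (pvReach macros (pvCallees commands)).all (fun n =>
    match pvLookup macros n with
    | some b => pvOkBody macros b && !((pvReach macros (pvSuccs macros n)).contains n)
    | none => false) = true

instance (commands : List (String × List String)) (macros : List (String × List (String × List String))) : Decidable (Pre_expand_macros commands macros) := by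
  unfold Pre_expand_macros; infer_instance

def pvWitness_expand_macros : (List (String × List String)) × (List (String × List (String × List String))) :=
  ([("A", []), ("CALL", ["M"]), ("B", ["z"])],
   [("M", [("X", ["1"]), ("CALL", ["N"])]), ("N", [("Y", [])])])

def Spec_expand_macros (commands : List (String × List String)) (macros : List (String × List (String × List String))) (out : List (String × List String)) : Prop := out = expand_macros_alt commands macros
instance (commands : List (String × List String)) (macros : List (String × List (String × List String))) (out : List (String × List String)) : Decidable (Spec_expand_macros commands macros out) := by unfold Spec_expand_macros; infer_instance

-- ===== CLAIM (what is proved, stated in full; the proofs are below) =====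
def Claim_equal_expand_macros : Prop := ∀ (commands : List (String × List String)) (macros : List (String × List (String × List String))), Dom_expand_macros commands macros → Pre_expand_macros commands macros → Spec_expand_macros commands macros (expand_macros commands macros)

-- ===== LEMMAS AND PROOFS =====
-- one-level substitution, as a flatMap
def gstep (macros : List (String × List (String × List String))) (c : String × List String) : List (String × List String) :=
  if c.1 == "CALL" then
    match c.2.head? with
    | none => []
    | some name => (pvLookup macros name).getD []
  else [c]

def stepM (macros : List (String × List (String × List String))) (cs : List (String × List String)) : List (String × List String) :=
  cs.flatMap (gstep macros)

theorem stepB_eq_stepM (macros : List (String × List (String × List String))) (cs : List (String × List String)) :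
    stepB macros cs = stepM macros cs := by
  unfold stepB stepM
  have h : (fun (acc : List (String × List String)) c =>
      if c.1 == "CALL" then
        match c.2.head? with
        | none => acc
        | some name =>
          match pvLookup macros name with
          | none => acc
          | some body => acc ++ body
      else acc ++ [c]) = (fun acc c => acc ++ gstep macros c) := by
    funext acc c
    by_cases hc : c.1 == "CALL" <;> simp [gstep, hc]
    cases c.2.head? with
    | none => simp
    | some name => cases hl : pvLookup macros name <;> simp [hl]
  rw [h, PySem.List.foldl_append_eq_flatMap, List.nil_append]

theorem expandAux_succ (macros : List (String × List (String × List String))) (f : Nat) (cs : List (String × List String)) :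
    expandAux macros (f+1) cs = cs.flatMap (fun c =>
      if c.1 == "CALL" then
        match c.2.head? with
        | none => []
        | some name =>
          match pvLookup macros name with
          | none => []
          | some body => expandAux macros f body
      else [c]) := by
  conv_lhs => rw [expandAux]
  have h : (fun (acc : List (String × List String)) c =>
      if c.1 == "CALL" then
        match c.2.head? with
        | none => acc
        | some name =>
          match pvLookup macros name with
          | none => acc
          | some body => acc ++ expandAux macros f body
      else acc ++ [c]) = (fun acc c => acc ++ (if c.1 == "CALL" then
        match c.2.head? with
        | none => []
        | some name =>
          match pvLookup macros name with
          | none => []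
          | some body => expandAux macros f body
      else [c])) := by
    funext acc c
    by_cases hc : c.1 == "CALL" <;> simp [hc]
    cases c.2.head? with
    | none => simp
    | some name => cases hl : pvLookup macros name <;> simp [hl]
  rw [h, PySem.List.foldl_append_eq_flatMap, List.nil_append]

theorem expandAux_append (macros : List (String × List (String × List String))) (f : Nat) (xs ys : List (String × List String)) :
    expandAux macros f (xs ++ ys) = expandAux macros f xs ++ expandAux macros f ys := by
  cases f with
  | zero => simp [expandAux]
  | succ f => rw [expandAux_succ, expandAux_succ, expandAux_succ, List.flatMap_append]

theorem expandAux_commute (macros : List (String × List (String × List String))) (f : Nat) (cs : List (String × List String)) :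
    expandAux macros (f+1) cs = expandAux macros f (stepM macros cs) := by
  induction cs with
  | nil => cases f <;> simp [expandAux, stepM]
  | cons c tl ih =>
    have hstep : stepM macros (c :: tl) = gstep macros c ++ stepM macros tl := by
      simp [stepM]
    rw [expandAux_succ] at ih ⊢
    rw [List.flatMap_cons, hstep, expandAux_append, ← ih]
    congr 1
    by_cases hc : c.1 == "CALL"
    · simp only [gstep, hc, if_pos]
      cases c.2.head? with
      | none => cases f <;> simp [expandAux]
      | some name =>
        cases hl : pvLookup macros name with
        | none => simp [hl]; cases f <;> simp [expandAux]
        | some body => simp [hl]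
    · have hc' : (c.1 == "CALL") = false := by simpa using hc
      simp only [gstep, hc', Bool.false_eq_true, if_false]
      cases f with
      | zero => simp [expandAux]
      | succ f =>
        rw [expandAux_succ]
        simp only [List.flatMap_cons, List.flatMap_nil, List.append_nil, hc', Bool.false_eq_true, if_false]

theorem stepM_of_no_call (macros : List (String × List (String × List String))) (cs : List (String × List String))
    (h : hasCall cs = false) : stepM macros cs = cs := by
  induction cs with
  | nil => simp [stepM]
  | cons c tl ih =>
    simp only [hasCall, List.any_cons, Bool.or_eq_false_iff] at h
    have hrec : stepM macros tl = tl := ih h.2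
    simp only [stepM, List.flatMap_cons] at hrec ⊢
    rw [hrec]
    simp [gstep, h.1]

theorem expandAux_of_no_call (macros : List (String × List (String × List String))) (f : Nat) (cs : List (String × List String))
    (h : hasCall cs = false) : expandAux macros f cs = cs := by
  induction f with
  | zero => simp [expandAux]
  | succ f ih => rw [expandAux_commute, stepM_of_no_call macros cs h, ih]

theorem loopB_eq_expandAux (macros : List (String × List (String × List String))) (f : Nat) (cs : List (String × List String)) :
    loopB macros f cs = expandAux macros f cs := by
  induction f generalizing cs with
  | zero => simp [loopB, expandAux]
  | succ f ih =>
    by_cases h : hasCall cs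
    · simp only [loopB, h, if_pos]
      rw [ih, stepB_eq_stepM, ← expandAux_commute]
    · have h' : hasCall cs = false := by simpa using h
      simp only [loopB, h', Bool.false_eq_true, if_false]
      rw [expandAux_of_no_call macros (f+1) cs h']

-- ===== VERDICT (by name: the statement is the Claim_ definition above) =====
theorem expand_macros_spec : Claim_equal_expand_macros := by
  intro commands macros _ _
  unfold Spec_expand_macros expand_macros expand_macros_alt
  rw [loopB_eq_expandAux]
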